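-- pv_equiv track=rewrite | github.com/XinyuJiangCMU/miles | miles_plugins/harbor/utils.py | _append_prompt_suffix
-- ===== SOURCE A (Python) =====
-- def _append_prompt_suffix(tokens: list[int], prompt: list[int]) -> list[int]:
--     if not prompt:
--         return tokens
--
--     if len(prompt) >= len(tokens) and prompt[: len(tokens)] == tokens:
--         return tokens + prompt[len(tokens) :]
--
--     max_k = min(len(tokens), len(prompt))
--     for k in range(max_k, 0, -1):
--         if tokens[-k:] == prompt[:k]:
--             return tokens + prompt[k:]
--
--     return tokens + prompt
-- ===== SOURCE B (Python) =====
-- def _append_prompt_suffix(tokens: list[int], prompt: list[int]) -> list[int]: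
--     # KMP prefix-function on prompt + [sentinel] + tokens: the final border length
--     # is the longest overlap between a suffix of tokens and a prefix of prompt.
--     if not prompt:
--         return tokens
--     sep = object()  # equal to no int, so borders never cross the boundary
--     s = prompt + [sep] + tokens
--     pi = [0] * len(s)
--     j = 0
--     for i in range(1, len(s)):
--         while j > 0 and s[i] != s[j]:
--             j = pi[j - 1]
--         if s[i] == s[j]:
--             j += 1
--         pi[i] = j
--     return tokens + prompt[j:]
-- ===== Notes on version B (the rewrite author's own statement) =====
-- stated objective: faster
-- what changed: Replaces the descending loop that compares an O(k) slice pair for every candidate overlap k with a single KMP prefix-function pass over prompt + [sentinel] + tokens whose final border length is the longest overlap.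
import Mathlib
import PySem

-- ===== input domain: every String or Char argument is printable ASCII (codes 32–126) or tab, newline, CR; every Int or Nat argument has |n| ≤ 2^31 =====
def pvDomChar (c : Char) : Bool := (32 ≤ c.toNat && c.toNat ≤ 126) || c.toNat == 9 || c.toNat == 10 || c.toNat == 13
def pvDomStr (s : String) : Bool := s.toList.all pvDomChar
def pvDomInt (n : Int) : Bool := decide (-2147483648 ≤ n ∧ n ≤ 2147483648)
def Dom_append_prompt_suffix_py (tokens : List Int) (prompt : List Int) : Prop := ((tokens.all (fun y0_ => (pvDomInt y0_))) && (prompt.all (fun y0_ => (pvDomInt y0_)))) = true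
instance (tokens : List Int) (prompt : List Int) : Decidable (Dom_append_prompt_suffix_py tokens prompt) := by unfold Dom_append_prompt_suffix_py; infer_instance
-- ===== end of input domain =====

-- B replaces A's descending scan (an O(k) slice comparison per candidate overlap k) by one
-- KMP prefix-function pass over prompt ++ [sentinel] ++ tokens; objective: faster (O(n+m)).

-- ===== PORT A =====
-- for k in range(max_k, 0, -1): if tokens[-k:] == prompt[:k]: return tokens + prompt[k:]
def pvALoop (tokens prompt : List Int) : List Int → List Int
  | [] => tokens ++ prompt
  | k :: ks =>
    if PySem.List.slice tokens (some (-k)) none = PySem.List.slice prompt none (some k) then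
      tokens ++ PySem.List.slice prompt (some k) none
    else pvALoop tokens prompt ks

def append_prompt_suffix_py (tokens : List Int) (prompt : List Int) : List Int :=
  if prompt = [] then tokens
  else if tokens.length ≤ prompt.length ∧
          PySem.List.slice prompt none (some (tokens.length : Int)) = tokens then
    tokens ++ PySem.List.slice prompt (some (tokens.length : Int)) none
  else
    pvALoop tokens prompt (PySem.List.pyRange ((min tokens.length prompt.length : Nat) : Int) 0 (-1))

-- ===== PORT B =====
-- while j > 0 and s[i] != s[j]: j = pi[j-1]   (fuel = initial j; j strictly decreases)
def pvKmpFallback (s : List (Option Int)) (pi : List Nat) (c : Option Int) : Nat → Nat → Nat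
  | j, 0 => j
  | j, fuel + 1 =>
    if 0 < j ∧ s.getD j none ≠ c then pvKmpFallback s pi c (pi.getD (j - 1) 0) fuel else j

-- one iteration of the `for i in range(1, len(s))` loop; state = (pi table so far, current j)
def pvKmpStep (s : List (Option Int)) (st : List Nat × Nat) (i : Nat) : List Nat × Nat :=
  let c := s.getD i none
  let j1 := pvKmpFallback s st.1 c st.2 st.2
  let j2 := if s.getD j1 none = c then j1 + 1 else j1
  (st.1 ++ [j2], j2)

def append_prompt_suffix_py_alt (tokens : List Int) (prompt : List Int) : List Int :=
  if prompt = [] then tokens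
  else
    let s : List (Option Int) := prompt.map some ++ [none] ++ tokens.map some
    let st := (List.range' 1 (s.length - 1)).foldl (pvKmpStep s) ([0], 0)
    tokens ++ prompt.drop st.2

-- ===== PRECONDITION & SPEC =====
def Spec_append_prompt_suffix_py (tokens : List Int) (prompt : List Int) (out : List Int) : Prop := out = append_prompt_suffix_py_alt tokens prompt
instance (tokens : List Int) (prompt : List Int) (out : List Int) : Decidable (Spec_append_prompt_suffix_py tokens prompt out) := by unfold Spec_append_prompt_suffix_py; infer_instance

-- ===== CLAIM (what is proved, stated in full; the proofs are below) =====
def Claim_equal_append_prompt_suffix_py : Prop := ∀ (tokens : List Int) (prompt : List Int), Dom_append_prompt_suffix_py tokens prompt → Spec_append_prompt_suffix_py tokens prompt (append_prompt_suffix_py tokens prompt)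

-- ===== LEMMAS AND PROOFS =====

-- the value both programs compute: the largest overlap k (tokens' k-suffix = prompt's k-prefix)
def pvOv (t p : List Int) : Nat :=
  Nat.findGreatest (fun k => k ≤ t.length ∧ t.drop (t.length - k) = p.take k)
    (min t.length p.length)

-- length of the longest proper border of s (the prefix function's value at the last index)
def pvPi (s : List (Option Int)) : Nat :=
  Nat.findGreatest (fun k => s.take k <:+ s) (s.length - 1)

lemma pvFG_congr {P Q : Nat → Prop} [DecidablePred P] [DecidablePred Q] {b b' : Nat}
    (hb : b ≤ b') (hiff : ∀ k, k ≤ b' → (P k ↔ Q k)) (hQb : ∀ k, Q k → k ≤ b) :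
    Nat.findGreatest P b' = Nat.findGreatest Q b := by
  obtain ⟨h1, h2, h3⟩ := (Nat.findGreatest_eq_iff (P := P) (k := b')).mp rfl
  obtain ⟨g1, g2, g3⟩ := (Nat.findGreatest_eq_iff (P := Q) (k := b)).mp rfl
  apply le_antisymm
  · rcases Nat.eq_zero_or_pos (Nat.findGreatest P b') with h | h
    · omega
    · have hP := h2 (by omega)
      have hQ := (hiff _ h1).mp hP
      exact Nat.le_findGreatest (hQb _ hQ) hQ
  · rcases Nat.eq_zero_or_pos (Nat.findGreatest Q b) with h | h
    · omega
    · have hQ := g2 (by omega)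
      have hP := (hiff _ (le_trans g1 hb)).mpr hQ
      exact Nat.le_findGreatest (le_trans g1 hb) hP

lemma take_suffix_iff_drop {α : Type} (s : List α) (k : Nat) (hk : k ≤ s.length) :
    s.take k <:+ s ↔ s.drop (s.length - k) = s.take k := by
  rw [List.suffix_iff_eq_drop, List.length_take, min_eq_left hk, eq_comm]

lemma sent_take (t p : List Int) (s : List (Option Int))
    (hs : s = p.map some ++ [(none : Option Int)] ++ t.map some) (k : Nat) (hkp : k ≤ p.length) :
    s.take k = (p.take k).map some := by
  subst hs
  rw [List.take_append, List.take_append]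
  have e1 : k - (p.map some).length = 0 := by simp; omega
  have e2 : k - (p.map some ++ [(none : Option Int)]).length = 0 := by
    simp; omega
  rw [e1, e2]
  simp [List.map_take]

lemma sent_drop (t p : List Int) (s : List (Option Int))
    (hs : s = p.map some ++ [(none : Option Int)] ++ t.map some) (k : Nat) (hkt : k ≤ t.length) :
    s.drop (s.length - k) = (t.drop (t.length - k)).map some := by
  subst hs
  rw [List.drop_append]
  have e1 : (p.map some ++ [(none : Option Int)]).drop
      ((p.map some ++ [(none : Option Int)] ++ t.map some).length - k) = [] :=
    List.drop_of_length_le (by simp; omega)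
  have e2 : (p.map some ++ [(none : Option Int)] ++ t.map some).length - k -
      (p.map some ++ [(none : Option Int)]).length = t.length - k := by simp; omega
  rw [e1, e2]
  simp [List.map_drop]

lemma sent_getD (t p : List Int) (s : List (Option Int))
    (hs : s = p.map some ++ [(none : Option Int)] ++ t.map some) (i : Nat) (hi : i < s.length) :
    (s.getD i none = none ↔ i = p.length) := by
  subst hs
  constructor
  · intro h
    by_contra hne
    rcases Nat.lt_or_ge i p.length with hlt | hge
    · rw [List.append_assoc, List.getD_append _ _ _ _ (by simpa using hlt),
        List.getD_eq_getElem _ _ (by simpa using hlt)] at h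
      simp at h
    · have hgt : p.length + 1 ≤ i := by omega
      rw [List.getD_append_right _ _ _ _ (by simp; omega),
        List.getD_eq_getElem _ _ (by simp at hi ⊢; omega)] at h
      simp at h
  · intro h
    subst h
    rw [List.append_assoc, List.getD_append_right _ _ _ _ (by simp), List.length_map,
      Nat.sub_self]
    rfl

lemma border_iff_overlap (t p : List Int) (k : Nat)
    (hk : k < (p.map some ++ [(none : Option Int)] ++ t.map some).length) :
    ((p.map some ++ [(none : Option Int)] ++ t.map some).take k <:+
       (p.map some ++ [(none : Option Int)] ++ t.map some)) ↔
    (k ≤ t.length ∧ t.drop (t.length - k) = p.take k) := by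
  set s := (p.map some ++ [(none : Option Int)] ++ t.map some) with hsdef
  have hslen : s.length = p.length + 1 + t.length := by rw [hsdef]; simp; omega
  constructor
  · intro hb
    rw [take_suffix_iff_drop _ _ (by omega)] at hb
    have hkp : k ≤ p.length := by
      by_contra hgt
      push_neg at hgt
      have hd1 : p.length < (s.take k).length := by
        rw [List.length_take]
        omega
      have h1 : (s.take k).getD p.length none = none := by
        rw [List.getD_eq_getElem _ _ hd1, List.getElem_take,
          ← List.getD_eq_getElem _ none (by omega)]
        exact (sent_getD t p s hsdef p.length (by omega)).mpr rfl
      rw [← hb] at h1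
      have hd2 : p.length < (s.drop (s.length - k)).length := by
        rw [List.length_drop]
        omega
      rw [List.getD_eq_getElem _ _ hd2, List.getElem_drop,
        ← List.getD_eq_getElem _ none (by omega)] at h1
      have := (sent_getD t p s hsdef _ (by omega)).mp h1
      omega
    have hkt : k ≤ t.length := by
      by_contra hgt
      push_neg at hgt
      have hd1 : p.length - (s.length - k) < (s.drop (s.length - k)).length := by
        rw [List.length_drop]
        omega
      have hval : (s.drop (s.length - k)).getD (p.length - (s.length - k)) none = none := by
        rw [List.getD_eq_getElem _ _ hd1, List.getElem_drop,
          ← List.getD_eq_getElem _ none (by omega),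
          show s.length - k + (p.length - (s.length - k)) = p.length by omega]
        exact (sent_getD t p s hsdef p.length (by omega)).mpr rfl
      have h1 : (none : Option Int) ∈ s.drop (s.length - k) := by
        rw [List.getD_eq_getElem _ _ hd1] at hval
        exact hval ▸ List.getElem_mem hd1
      rw [hb, sent_take t p s hsdef k hkp] at h1
      have h2 := List.mem_of_mem_take (by simpa using h1)
      simp at h2
    refine ⟨hkt, ?_⟩
    rw [sent_take t p s hsdef k hkp, sent_drop t p s hsdef k hkt] at hb
    exact List.map_injective_iff.mpr (Option.some_injective _) hb
  · rintro ⟨hkt, heq⟩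
    have hkp : k ≤ p.length := by
      have := congrArg List.length heq
      simp at this
      omega
    rw [take_suffix_iff_drop _ _ (by omega), sent_take t p s hsdef k hkp,
      sent_drop t p s hsdef k hkt, heq]

lemma pyRange_desc (m : Nat) :
    PySem.List.pyRange (m : Int) 0 (-1) = (List.range' 1 m).reverse.map (fun k : Nat => (k : Int)) := by
  have key : PySem.List.pyRange (m : Int) 0 (-1) =
      (List.range m).map (fun k : Nat => (m : Int) - (k : Int)) := by
    unfold PySem.List.pyRange
    norm_num
    rcases Nat.eq_zero_or_pos m with h | h
    · simp [h]
    · rw [if_pos (by exact_mod_cast h)]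
      apply List.map_congr_left
      intro a _
      ring
  rw [key]
  apply List.ext_getElem
  · simp
  · intro i h1 h2
    have hi : i < m := by simpa using h2
    rw [List.getElem_map, List.getElem_range, List.getElem_map, List.getElem_reverse,
      List.getElem_range']
    simp only [List.length_range']
    omega

lemma aLoop_spec (t p : List Int) (m : Nat) (hm : m ≤ min t.length p.length) :
    pvALoop t p ((List.range' 1 m).reverse.map (fun k : Nat => (k : Int))) =
      t ++ p.drop (Nat.findGreatest
        (fun k => k ≤ t.length ∧ t.drop (t.length - k) = p.take k) m) := by
  induction m with
  | zero => simp [pvALoop]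
  | succ m ih =>
    rw [List.range'_1_concat, List.reverse_append, Nat.add_comm 1 m]
    simp only [List.reverse_cons, List.reverse_nil, List.nil_append, List.singleton_append,
      List.map_cons]
    simp only [pvALoop]
    rw [PySem.List.slice_from_neg_natCast t (m + 1) (by omega),
      PySem.List.slice_to_natCast, PySem.List.slice_from_natCast,
      Nat.findGreatest_succ]
    split_ifs with h1 h2 h3
    · rfl
    · exact absurd ⟨by omega, h1⟩ h2
    · exact absurd h3.2 h1
    · exact ih (by omega)

lemma A_eq (t p : List Int) : append_prompt_suffix_py t p = t ++ p.drop (pvOv t p) := by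
  unfold append_prompt_suffix_py pvOv
  split_ifs with h1 h2
  · subst h1; simp
  · obtain ⟨hle, heq⟩ := h2
    rw [PySem.List.slice_to_natCast] at heq
    rw [PySem.List.slice_from_natCast]
    have hmin : min t.length p.length = t.length := by omega
    rw [hmin]
    have hfg : Nat.findGreatest
        (fun k => k ≤ t.length ∧ t.drop (t.length - k) = p.take k) t.length = t.length := by
      apply (Nat.findGreatest_eq_iff).mpr
      refine ⟨le_rfl, fun _ => ⟨le_rfl, by simp [heq]⟩, fun k hk hk' => by omega⟩
    rw [hfg]
  · rw [pyRange_desc, aLoop_spec t p _ (le_refl _)]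

lemma pvPi_border (v : List (Option Int)) : v.take (pvPi v) <:+ v := by
  unfold pvPi
  exact Nat.findGreatest_spec (P := fun k => v.take k <:+ v) (m := 0) (Nat.zero_le _)
    (by simp)

lemma pvPi_le (v : List (Option Int)) : pvPi v ≤ v.length - 1 := Nat.findGreatest_le _

lemma pvPi_max (v : List (Option Int)) (k : Nat) (hk : k ≤ v.length - 1)
    (h : v.take k <:+ v) : k ≤ pvPi v := Nat.le_findGreatest hk h

lemma fallback_spec (s : List (Option Int)) (pi : List Nat) (c : Option Int) (n : Nat)
    (hn : n ≤ s.length)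
    (hpi : ∀ m, m < n → pi.getD m 0 = pvPi (s.take (m + 1))) :
    ∀ fuel j, j ≤ fuel → j + 1 ≤ n → (s.take n).take j <:+ s.take n →
      (((s.take n).take (pvKmpFallback s pi c j fuel) <:+ s.take n) ∧
       pvKmpFallback s pi c j fuel ≤ j ∧
       (pvKmpFallback s pi c j fuel = 0 ∨
         s.getD (pvKmpFallback s pi c j fuel) none = c) ∧
       (∀ k, k ≤ j → (s.take n).take k <:+ s.take n → s.getD k none = c →
         k ≤ pvKmpFallback s pi c j fuel)) := by
  intro fuel
  induction fuel with
  | zero =>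
    intro j hj hjn hb
    have : j = 0 := by omega
    subst this
    exact ⟨hb, le_rfl, Or.inl rfl, fun k hk _ _ => hk⟩
  | succ fuel ih =>
    intro j hj hjn hb
    simp only [pvKmpFallback]
    split_ifs with hcond
    · obtain ⟨hj0, hne⟩ := hcond
      have hjlen : ((s.take n).take j).length = j := by
        simp [List.length_take]; omega
      have hjtake : (s.take n).take j = s.take j := by
        rw [List.take_take]; congr 1; omega
      have hjslen : (s.take j).length = j := by simp; omega
      have hj'eq : pi.getD (j - 1) 0 = pvPi (s.take j) := by
        have := hpi (j - 1) (by omega)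
        rwa [Nat.sub_add_cancel hj0] at this
      have hppile : pvPi (s.take j) ≤ j - 1 := by
        have := pvPi_le (s.take j); omega
      have hfuel : pi.getD (j - 1) 0 ≤ fuel := by rw [hj'eq]; omega
      have hb' : (s.take n).take (pi.getD (j - 1) 0) <:+ s.take n := by
        rw [hj'eq]
        have h1 : (s.take j).take (pvPi (s.take j)) <:+ s.take j := pvPi_border _
        have h2 : (s.take n).take (pvPi (s.take j)) = (s.take j).take (pvPi (s.take j)) := by
          rw [List.take_take, List.take_take]
          congr 1
          omega
        have hbj : s.take j <:+ s.take n := by rw [← hjtake]; exact hb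
        rw [h2]
        exact h1.trans hbj
      obtain ⟨r1, r2, r3, r4⟩ := ih (pi.getD (j - 1) 0) hfuel (by rw [hj'eq]; omega) hb'
      refine ⟨r1, by rw [hj'eq] at r2 ⊢; omega, r3, ?_⟩
      intro k hk hkb hkc
      have hkj : k ≠ j := by
        intro he; subst he; exact hne hkc
      have hkj' : k < j := by omega
      apply r4 k ?_ hkb hkc
      rw [hj'eq]
      apply pvPi_max
      · omega
      · have hkb' : (s.take n).take k <:+ (s.take n).take j := by
          apply List.suffix_of_suffix_length_le hkb hb
          rw [hjlen, List.length_take]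
          omega
        rw [hjtake] at hkb'
        have : (s.take n).take k = (s.take j).take k := by
          rw [List.take_take, List.take_take]; congr 1; omega
        rwa [this] at hkb'
    · push_neg at hcond
      refine ⟨hb, le_rfl, ?_, fun k hk _ _ => hk⟩
      rcases Nat.eq_zero_or_pos j with h0 | h0
      · exact Or.inl h0
      · exact Or.inr (hcond h0)

lemma ext_border (s : List (Option Int)) (n : Nat) (hn : n < s.length) (k : Nat) (hk : k < n) :
    ((s.take (n + 1)).take (k + 1) <:+ s.take (n + 1)) ↔
      ((s.take n).take k <:+ s.take n ∧ s.getD k none = s.getD n none) := by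
  have hslen : (s.take n).length = n := by simp; omega
  have hs1len : (s.take (n + 1)).length = n + 1 := by simp; omega
  have hu' : s.take (n + 1) = s.take n ++ [s.getD n none] := by
    rw [List.take_add_one]
    simp [List.getD, List.getElem?_eq_getElem hn]
  have hgk : s.getD k none = (s.take n).getD k none := by
    rw [List.getD_eq_getElem s none (by omega),
      List.getD_eq_getElem _ _ (show k < (s.take n).length by omega), List.getElem_take]
  have htk : (s.take n).take (k + 1) = (s.take n).take k ++ [(s.take n).getD k none] := by
    rw [List.take_add_one]
    simp [List.getD, List.getElem?_eq_getElem (show k < (s.take n).length by omega)]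
  rw [take_suffix_iff_drop _ _ (by omega),
    take_suffix_iff_drop _ _ (show k ≤ (s.take n).length by omega)]
  rw [hu', List.take_append, List.drop_append]
  rw [List.length_append, hslen, List.length_singleton]
  have e1 : (k + 1) - n = 0 := by omega
  have e2 : n + 1 - (k + 1) - n = 0 := by omega
  have e3 : n + 1 - (k + 1) = n - k := by omega
  rw [e1, e2, e3]
  simp only [List.take_zero, List.drop_zero, List.append_nil]
  rw [htk]
  constructor
  · intro h
    obtain ⟨h1, h2⟩ := List.append_inj' h (by simp)
    refine ⟨h1, ?_⟩
    rw [hgk]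
    exact (List.singleton_inj.mp h2).symm
  · rintro ⟨h1, h2⟩
    rw [h1, ← hgk, h2]

lemma kmp_step_spec (s : List (Option Int)) (n : Nat) (h1 : 1 ≤ n) (hn : n < s.length)
    (pi : List Nat) (hpi : ∀ m, m < n → pi.getD m 0 = pvPi (s.take (m + 1))) :
    pvKmpStep s (pi, pvPi (s.take n)) n =
      (pi ++ [pvPi (s.take (n + 1))], pvPi (s.take (n + 1))) := by
  have hslen : (s.take n).length = n := by simp; omega
  have hs1len : (s.take (n + 1)).length = n + 1 := by simp; omega
  set c := s.getD n none with hc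
  set j0 := pvPi (s.take n) with hj0def
  have hj0 : j0 ≤ n - 1 := by have := pvPi_le (s.take n); omega
  obtain ⟨r1, r2, r3, r4⟩ :=
    fallback_spec s pi c n (by omega) hpi j0 j0 le_rfl (by omega) (pvPi_border (s.take n))
  set r := pvKmpFallback s pi c j0 j0 with hrdef
  have key : pvPi (s.take (n + 1)) = (if s.getD r none = c then r + 1 else r) := by
    unfold pvPi
    rw [hs1len]
    simp only [Nat.add_sub_cancel]
    apply (Nat.findGreatest_eq_iff).mpr
    refine ⟨?_, ?_, ?_⟩
    · split_ifs <;> omega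
    · intro hne
      split_ifs at hne ⊢ with hcnd
      · exact (ext_border s n hn r (by omega)).mpr ⟨r1, hcnd⟩
      · rcases r3 with h0 | hgc
        · omega
        · exact absurd hgc hcnd
    · intro k hk1 hk2 hbk
      rcases Nat.exists_eq_add_of_lt (show 0 < k by omega) with ⟨m, hm⟩
      have hmk : k = m + 1 := by omega
      subst hmk
      obtain ⟨hbm, hmc⟩ := (ext_border s n hn m (by omega)).mp hbk
      have hm0 : m ≤ j0 := pvPi_max (s.take n) m (by omega) hbm
      have hmr : m ≤ r := r4 m hm0 hbm hmc
      split_ifs at hk1 with hcnd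
      · omega
      · rcases r3 with h0 | hgc
        · have : m = 0 := by omega
          subst this
          rw [h0] at hcnd
          exact hcnd hmc
        · exact hcnd hgc
  show (pi ++ [if s.getD (pvKmpFallback s pi c j0 j0) none = c
      then pvKmpFallback s pi c j0 j0 + 1 else pvKmpFallback s pi c j0 j0],
      if s.getD (pvKmpFallback s pi c j0 j0) none = c
      then pvKmpFallback s pi c j0 j0 + 1 else pvKmpFallback s pi c j0 j0) = _
  rw [← hrdef, ← key]

lemma pvPi_take_one (s : List (Option Int)) (hs : 1 ≤ s.length) : pvPi (s.take 1) = 0 := by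
  unfold pvPi
  have : (s.take 1).length = 1 := by simp; omega
  rw [this]
  rfl

lemma kmp_inv (s : List (Option Int)) (d : Nat) (hd : d + 1 ≤ s.length) :
    ((List.range' 1 d).foldl (pvKmpStep s) ([0], 0)).1.length = d + 1 ∧
    (∀ m, m < d + 1 →
      ((List.range' 1 d).foldl (pvKmpStep s) ([0], 0)).1.getD m 0 = pvPi (s.take (m + 1))) ∧
    ((List.range' 1 d).foldl (pvKmpStep s) ([0], 0)).2 = pvPi (s.take (d + 1)) := by
  induction d with
  | zero =>
    refine ⟨rfl, ?_, ?_⟩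
    · intro m hm
      have : m = 0 := by omega
      subst this
      simp [pvPi_take_one s hd]
    · simp [pvPi_take_one s hd]
  | succ d ih =>
    obtain ⟨ihlen, ihpi, ihj⟩ := ih (by omega)
    rw [List.range'_1_concat, List.foldl_append, List.foldl_cons, List.foldl_nil]
    set st := (List.range' 1 d).foldl (pvKmpStep s) ([0], 0) with hst
    have hsteq : st = (st.1, pvPi (s.take (d + 1))) := by
      rw [← ihj]
    have hstep := kmp_step_spec s (d + 1) (by omega) (by omega) st.1 ihpi
    rw [Nat.add_comm 1 d, hsteq, hstep]
    refine ⟨?_, ?_, rfl⟩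
    · simp [ihlen]
    · intro m hm
      dsimp only
      rcases Nat.lt_or_ge m (d + 1) with h | h
      · rw [List.getD_append _ _ _ _ (by omega)]
        exact ihpi m h
      · have hmeq : m = d + 1 := by omega
        subst hmeq
        rw [List.getD_append_right _ _ _ _ (by omega)]
        simp [ihlen]

lemma B_eq (t p : List Int) : append_prompt_suffix_py_alt t p = t ++ p.drop (pvOv t p) := by
  unfold append_prompt_suffix_py_alt
  split_ifs with h1
  · subst h1; simp
  · dsimp only
    set s := p.map some ++ [(none : Option Int)] ++ t.map some with hsdef
    have hp1 : 1 ≤ p.length := by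
      cases p
      · exact absurd rfl h1
      · simp
    have hslen : s.length = p.length + 1 + t.length := by rw [hsdef]; simp; omega
    obtain ⟨_, _, h2⟩ := kmp_inv s (s.length - 1) (by omega)
    rw [h2, show s.length - 1 + 1 = s.length by omega, List.take_length]
    have hpi : pvPi s = pvOv t p := by
      unfold pvPi pvOv
      apply pvFG_congr
      · omega
      · intro k hk
        rw [hsdef]
        have hk' : k < (p.map some ++ [(none : Option Int)] ++ t.map some).length := by
          rw [← hsdef]; omega
        have := border_iff_overlap t p k hk'
        constructor
        · intro hbb
          exact ⟨(this.mp hbb).1, (this.mp hbb).2⟩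
        · rintro ⟨ha, hbq⟩
          exact this.mpr ⟨ha, hbq⟩
      · rintro k ⟨hkt, heq⟩
        have := congrArg List.length heq
        simp at this
        omega
    rw [hpi]

-- ===== VERDICT (by name: the statement is the Claim_ definition above) =====
theorem append_prompt_suffix_py_spec : Claim_equal_append_prompt_suffix_py := by
  intro tokens prompt _
  unfold Spec_append_prompt_suffix_py
  rw [A_eq, B_eq]
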